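-- pv_equiv track=rewrite | github.com/rizvisha/Python | ROUGH WORK.py | last_phonemes
-- ===== SOURCE A (Python) =====
-- def last_phonemes(lst):
--     phonemes = []
--     i = len(lst) - 1
--     c = i
--     while i >= 0:
--         if lst[i].endswith('0') or lst[i].endswith('1') or lst[i].endswith('2'):
--             while i <= c:
--                 phonemes.append(lst[i])
--                 i +=1
--             return phonemes
--         i -= 1
--     return phonemes
-- ===== SOURCE B (Python) =====
-- def last_phonemes(lst):
--     idx = -1
--     for i, p in enumerate(lst):
--         if p.endswith(('0', '1', '2')):
--             idx = i
--     return list(lst[idx:]) if idx >= 0 else []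
-- ===== Notes on version B (the rewrite author's own statement) =====
-- stated objective: faster
-- what changed: Replaces A's backward while-loop search plus inner element-by-element append loop with a single forward pass that remembers the last stressed index and builds the result with one slice lst[idx:].
import Mathlib
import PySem

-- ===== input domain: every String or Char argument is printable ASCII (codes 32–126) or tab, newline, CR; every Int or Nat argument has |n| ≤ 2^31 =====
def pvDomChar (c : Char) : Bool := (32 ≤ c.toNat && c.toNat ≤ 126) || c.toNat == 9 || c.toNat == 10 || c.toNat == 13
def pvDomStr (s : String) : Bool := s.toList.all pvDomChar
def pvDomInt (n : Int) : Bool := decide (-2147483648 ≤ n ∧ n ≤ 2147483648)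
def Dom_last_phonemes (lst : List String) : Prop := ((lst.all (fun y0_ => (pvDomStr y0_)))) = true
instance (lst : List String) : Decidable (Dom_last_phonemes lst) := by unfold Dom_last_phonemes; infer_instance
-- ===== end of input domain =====

-- B replaces A's backward search with inner append loop by a forward pass recording the last stressed index plus one slice (simpler).


-- ===== PORT A =====
-- lst[i].endswith('0') or lst[i].endswith('1') or lst[i].endswith('2')
def pyStressed (s : String) : Bool :=
  PySem.Str.endswith s "0" || PySem.Str.endswith s "1" || PySem.Str.endswith s "2"

-- inner 'while i <= c: phonemes.append(lst[i]); i += 1' (i always in range when reached)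
def lastPhInner (lst : List String) (c : Nat) (i : Nat) : List String :=
  if _h : i ≤ c then lst.getD i "" :: lastPhInner lst c (i + 1) else []
termination_by c + 1 - i

-- outer 'while i >= 0: … i -= 1' as recursion on i+1
def lastPhOuter (lst : List String) : Nat → List String
  | 0 => []
  | n + 1 =>
    if pyStressed (lst.getD n "") then lastPhInner lst (lst.length - 1) n
    else lastPhOuter lst n

def last_phonemes (lst : List String) : List String := lastPhOuter lst lst.length

-- ===== PORT B =====
def last_phonemes_alt (lst : List String) : List String :=
  let idx : Int :=
    (PySem.List.enumerate lst 0).foldl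
      (fun acc p => if pyStressed p.2 then p.1 else acc) (-1)
  if 0 ≤ idx then PySem.List.slice lst (some idx) none else []

-- ===== PRECONDITION & SPEC =====
def Spec_last_phonemes (lst : List String) (out : List String) : Prop := out = last_phonemes_alt lst
instance (lst : List String) (out : List String) : Decidable (Spec_last_phonemes lst out) := by unfold Spec_last_phonemes; infer_instance

-- ===== CLAIM (what is proved, stated in full; the proofs are below) =====
def Claim_equal_last_phonemes : Prop := ∀ (lst : List String), Dom_last_phonemes lst → Spec_last_phonemes lst (last_phonemes lst)

-- ===== LEMMAS AND PROOFS =====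

-- index (from the front) of the last stressed element, if any
def lastIdx : List String → Option Nat
  | [] => none
  | x :: xs =>
    match lastIdx xs with
    | some j => some (j + 1)
    | none => if pyStressed x then some 0 else none

theorem lastIdx_snoc (xs : List String) (x : String) :
    lastIdx (xs ++ [x]) = if pyStressed x then some xs.length else lastIdx xs := by
  induction xs with
  | nil => simp [lastIdx]
  | cons y ys ih =>
    simp only [List.cons_append, lastIdx, ih]
    by_cases hx : pyStressed x
    · simp [hx]
    · cases hys : lastIdx ys <;> simp [hx]

theorem inner_eq (lst : List String) (hne : lst ≠ []) :
    ∀ k i, lst.length - i ≤ k → lastPhInner lst (lst.length - 1) i = lst.drop i := by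
  intro k
  induction k with
  | zero =>
    intro i hi
    have hlen : lst.length ≤ i := by omega
    rw [lastPhInner]
    have h1 : 0 < lst.length := List.length_pos_iff.mpr hne
    rw [dif_neg (by omega)]
    exact (List.drop_eq_nil_of_le hlen).symm
  | succ k ih =>
    intro i hi
    by_cases hlt : i < lst.length
    · rw [lastPhInner, dif_pos (by omega)]
      rw [List.getD_eq_getElem?_getD, List.getElem?_eq_getElem hlt]
      rw [ih (i + 1) (by omega)]
      exact (List.drop_eq_getElem_cons hlt).symm
    · rw [lastPhInner]
      have h1 : 0 < lst.length := List.length_pos_iff.mpr hne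
      rw [dif_neg (by omega)]
      exact (List.drop_eq_nil_of_le (by omega)).symm

theorem outer_eq (lst : List String) :
    ∀ n, n ≤ lst.length →
      lastPhOuter lst n =
        (match lastIdx (lst.take n) with
         | some j => lst.drop j
         | none => []) := by
  intro n
  induction n with
  | zero => intro _; simp [lastPhOuter, lastIdx]
  | succ n ih =>
    intro hn
    have hlt : n < lst.length := by omega
    have hne : lst ≠ [] := by intro h; simp [h] at hlt
    have htake : lst.take (n + 1) = lst.take n ++ [lst[n]] := by
      rw [List.take_add_one, List.getElem?_eq_getElem hlt]; rfl
    have hlen : (lst.take n).length = n := by simp [Nat.le_of_lt hlt]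
    rw [lastPhOuter, htake, lastIdx_snoc, hlen]
    rw [List.getD_eq_getElem?_getD, List.getElem?_eq_getElem hlt]
    simp only [Option.getD_some]
    by_cases hs : pyStressed lst[n]
    · simp only [hs, if_true]
      exact inner_eq lst hne (lst.length - n) n (by omega)
    · simp only [hs, if_false, Bool.false_eq_true]
      exact ih (by omega)

theorem fold_eq (lst : List String) :
    ∀ (s : Int) (acc : Int),
      (PySem.List.enumerate lst s).foldl
        (fun acc p => if pyStressed p.2 then p.1 else acc) acc =
      (match lastIdx lst with
       | some j => s + (j : Int)
       | none => acc) := by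
  induction lst with
  | nil => intro s acc; simp [PySem.List.enumerate_nil, lastIdx]
  | cons x xs ih =>
    intro s acc
    rw [PySem.List.enumerate_cons]
    simp only [List.foldl_cons, ih (s + 1), lastIdx]
    cases hxs : lastIdx xs with
    | some j => push_cast; ring_nf
    | none => by_cases hs : pyStressed x <;> simp [hs]

-- ===== VERDICT (by name: the statement is the Claim_ definition above) =====
theorem last_phonemes_spec : Claim_equal_last_phonemes := by
  intro lst _
  unfold Spec_last_phonemes last_phonemes last_phonemes_alt
  rw [outer_eq lst lst.length le_rfl, List.take_length, fold_eq lst 0 (-1)]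
  cases h : lastIdx lst with
  | some j =>
    simp only [zero_add]
    rw [if_pos (by positivity)]
    rw [PySem.List.slice_from_natCast]
  | none => simp
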